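-- pv_equiv track=rewrite | github.com/rivSpades/algotrading-backend | backtest_engine/position_modes.py | normalize_position_modes
-- ===== SOURCE A (Python) =====
-- ALLOWED = frozenset({'long', 'short'})
--
-- DEFAULT_MODES = ['long', 'short']
--
-- def normalize_position_modes(value):
--     """
--     Return ordered unique subset of long/short (long first, then short).
--     None, empty, or invalid entries fall back to DEFAULT_MODES.
--     """
--     if value is None:
--         return list(DEFAULT_MODES)
--     if not isinstance(value, list):
--         return list(DEFAULT_MODES)
--     seen = set()
--     out = []
--     for m in value:
--         if m in ALLOWED and m not in seen:
--             seen.add(m)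
--             out.append(m)
--     if not out:
--         return list(DEFAULT_MODES)
--     order = {'long': 0, 'short': 1}
--     out.sort(key=lambda x: order[x])
--     return out
-- ===== SOURCE B (Python) =====
-- ALLOWED = frozenset({'long', 'short'})
--
-- DEFAULT_MODES = ['long', 'short']
--
-- def normalize_position_modes(value):
--     if value is None or not isinstance(value, list):
--         return list(DEFAULT_MODES)
--     present = set(value)
--     out = [m for m in DEFAULT_MODES if m in present]
--     return out if out else list(DEFAULT_MODES)
-- ===== Notes on version B (the rewrite author's own statement) =====
-- stated objective: simpler
-- what changed: Instead of scanning the input with a seen-set to collect first occurrences and then sorting by a rank dict, B builds a set of the input once and filters the canonical DEFAULT_MODES list against it, so no seen-set bookkeeping and no sort are needed.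
import Mathlib
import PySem

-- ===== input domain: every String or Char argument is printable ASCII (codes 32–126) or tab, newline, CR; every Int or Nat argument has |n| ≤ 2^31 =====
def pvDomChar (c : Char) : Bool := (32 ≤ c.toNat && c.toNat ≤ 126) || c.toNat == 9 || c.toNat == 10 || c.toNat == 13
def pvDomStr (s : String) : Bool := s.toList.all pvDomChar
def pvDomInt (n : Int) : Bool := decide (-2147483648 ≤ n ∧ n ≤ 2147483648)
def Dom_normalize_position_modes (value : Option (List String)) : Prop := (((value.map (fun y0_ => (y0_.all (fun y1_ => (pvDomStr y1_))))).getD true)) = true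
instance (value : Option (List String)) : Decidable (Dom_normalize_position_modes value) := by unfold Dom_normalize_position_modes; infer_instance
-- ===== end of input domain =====

-- B builds set(value) once and filters DEFAULT_MODES against it (no seen-set, no sort); same return value.

-- ===== PORT A =====
-- the loop body of A: if m in ALLOWED and m not in seen: seen.add(m); out.append(m)
def pvStepA (p : PySem.Set String × List String) (m : String) : PySem.Set String × List String :=
  if ((m == "long") || (m == "short")) && !(PySem.Set.contains p.1 m)
  then (PySem.Set.add p.1 m, p.2 ++ [m]) else p

def normalize_position_modes (value : Option (List String)) : List String :=
  match value with
  | none => ["long", "short"]             -- list(DEFAULT_MODES)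
  | some v =>
    let r := v.foldl pvStepA (PySem.Set.empty, [])
    if r.2 = [] then ["long", "short"]
    else
      -- out.sort(key=lambda x: order[x]); order[x] never misses since out ⊆ ALLOWED
      PySem.List.sorted r.2 (fun x => PySem.Dict.getD (PySem.Dict.mk [("long", (0 : Int)), ("short", 1)]) x 0) false

-- ===== PORT B =====
def normalize_position_modes_alt (value : Option (List String)) : List String :=
  match value with
  | none => ["long", "short"]
  | some v =>
    let present := PySem.Set.ofList v
    let out := ["long", "short"].filter (fun m => PySem.Set.contains present m)
    if out = [] then ["long", "short"] else out

-- ===== PRECONDITION & SPEC =====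
def Spec_normalize_position_modes (value : Option (List String)) (out : List String) : Prop := out = normalize_position_modes_alt value
instance (value : Option (List String)) (out : List String) : Decidable (Spec_normalize_position_modes value out) := by unfold Spec_normalize_position_modes; infer_instance

-- ===== CLAIM (what is proved, stated in full; the proofs are below) =====
def Claim_equal_normalize_position_modes : Prop := ∀ (value : Option (List String)), Dom_normalize_position_modes value → Spec_normalize_position_modes value (normalize_position_modes value)

-- ===== LEMMAS AND PROOFS =====

-- invariant of A's loop: seen has exactly out's members; out stays nodup, membership accumulates
lemma foldA_inv : ∀ (v : List String) (s : PySem.Set String) (o : List String),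
    (∀ x, x ∈ s ↔ x ∈ o) → o.Nodup →
    ((v.foldl pvStepA (s, o)).2.Nodup ∧
     (∀ x, x ∈ (v.foldl pvStepA (s, o)).2 ↔ x ∈ o ∨ ((x = "long" ∨ x = "short") ∧ x ∈ v))) := by
  intro v
  induction v with
  | nil => intro s o hs hn; simpa using hn
  | cons m v ih =>
    intro s o hs hn
    simp only [List.foldl_cons]
    by_cases hc : (((m == "long") || (m == "short")) && !(PySem.Set.contains s m)) = true
    · have hm : m = "long" ∨ m = "short" := by
        have h1 := (Bool.and_eq_true _ _).mp hc |>.1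
        rcases (Bool.or_eq_true _ _).mp h1 with h | h
        · exact Or.inl (by simpa using h)
        · exact Or.inr (by simpa using h)
      have hms : m ∉ s := by
        have h2 := (Bool.and_eq_true _ _).mp hc |>.2
        simpa [PySem.Set.contains] using h2
      have hmo : m ∉ o := fun h => hms ((hs m).mpr h)
      have hstep : pvStepA (s, o) m = (PySem.Set.add s m, o ++ [m]) := by
        simp only [pvStepA, if_pos hc]
      rw [hstep]
      have hs' : ∀ x, x ∈ PySem.Set.add s m ↔ x ∈ o ++ [m] := by
        intro x
        rw [PySem.Set.mem_add, List.mem_append, hs]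
        simp
      have hn' : (o ++ [m]).Nodup := by
        simp [List.nodup_append, hn]
        intro a ha hao; subst hao; exact hmo ha
      obtain ⟨ih1, ih2⟩ := ih (PySem.Set.add s m) (o ++ [m]) hs' hn'
      refine ⟨ih1, fun x => ?_⟩
      rw [ih2 x]
      constructor
      · rintro (h | ⟨ha, hv⟩)
        · rcases List.mem_append.mp h with h' | h'
          · exact Or.inl h'
          · simp at h'; subst h'
            exact Or.inr ⟨hm, List.mem_cons_self ..⟩
        · exact Or.inr ⟨ha, List.mem_cons_of_mem _ hv⟩
      · rintro (h | ⟨ha, hv⟩)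
        · exact Or.inl (List.mem_append.mpr (Or.inl h))
        · rcases List.mem_cons.mp hv with h' | h'
          · subst h'; exact Or.inl (by simp)
          · exact Or.inr ⟨ha, h'⟩
    · have hstep : pvStepA (s, o) m = (s, o) := by simp only [pvStepA, if_neg hc]
      rw [hstep]
      obtain ⟨ih1, ih2⟩ := ih s o hs hn
      refine ⟨ih1, fun x => ?_⟩
      rw [ih2 x]
      have hcase : ¬(m = "long" ∨ m = "short") ∨ m ∈ o := by
        by_cases ha : (m = "long" ∨ m = "short")
        · right
          by_contra hmo
          have hms : m ∉ s := fun h => hmo ((hs m).mp h)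
          apply hc
          have hcm : PySem.Set.contains s m = false := by
            simpa [PySem.Set.contains] using hms
          rcases ha with h | h <;> simp [PySem.Set.contains] at hcm ⊢ <;> simp [h] at hcm ⊢ <;> exact hcm
        · exact Or.inl ha
      constructor
      · rintro (h | ⟨ha, hv⟩)
        · exact Or.inl h
        · exact Or.inr ⟨ha, List.mem_cons_of_mem _ hv⟩
      · rintro (h | ⟨ha, hv⟩)
        · exact Or.inl h
        · rcases List.mem_cons.mp hv with h' | h'
          · subst h'
            rcases hcase with h'' | h''
            · exact absurd ha h''
            · exact Or.inl h''
          · exact Or.inr ⟨ha, h'⟩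

-- the out list of A's loop on the real initial state, pinned from membership + nodup
lemma outA_char (v : List String) :
    (v.foldl pvStepA (PySem.Set.empty, [])).2 = [] ∨
    (v.foldl pvStepA (PySem.Set.empty, [])).2 = ["long"] ∨
    (v.foldl pvStepA (PySem.Set.empty, [])).2 = ["short"] ∨
    (v.foldl pvStepA (PySem.Set.empty, [])).2 = ["long", "short"] ∨
    (v.foldl pvStepA (PySem.Set.empty, [])).2 = ["short", "long"] := by
  obtain ⟨hnd, hmem⟩ := foldA_inv v PySem.Set.empty []
    (by simp [PySem.Set.empty]) List.nodup_nil
  set o := (v.foldl pvStepA (PySem.Set.empty, [])).2 with ho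
  have hsub : ∀ x ∈ o, x = "long" ∨ x = "short" := by
    intro x hx
    rcases (hmem x).mp hx with h | ⟨ha, _⟩
    · simp at h
    · exact ha
  clear hmem ho
  match o, hnd, hsub with
  | [], _, _ => exact Or.inl rfl
  | [a], _, hsub =>
    rcases hsub a (by simp) with h | h <;> subst h <;> simp
  | [a, b], hnd, hsub =>
    have ha := hsub a (by simp)
    have hb := hsub b (by simp)
    have hab : a ≠ b := by simp [List.nodup_cons] at hnd; tauto
    rcases ha with h | h <;> rcases hb with h' | h' <;> subst h <;> subst h' <;> simp_all
  | a :: b :: c :: t, hnd, hsub =>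
    have ha := hsub a (by simp)
    have hb := hsub b (by simp)
    have hc := hsub c (by simp)
    simp [List.nodup_cons] at hnd
    rcases ha with h | h <;> rcases hb with h' | h' <;> rcases hc with h'' | h'' <;>
      subst h <;> subst h' <;> subst h'' <;> simp_all

lemma memA (v : List String) (x : String) :
    x ∈ (v.foldl pvStepA (PySem.Set.empty, [])).2 ↔ (x = "long" ∨ x = "short") ∧ x ∈ v := by
  obtain ⟨_, hmem⟩ := foldA_inv v PySem.Set.empty []
    (by simp [PySem.Set.empty]) List.nodup_nil
  rw [hmem x]; simp

-- ===== VERDICT (by name: the statement is the Claim_ definition above) =====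
theorem normalize_position_modes_spec : Claim_equal_normalize_position_modes := by
  intro value _
  unfold Spec_normalize_position_modes normalize_position_modes normalize_position_modes_alt
  match value with
  | none => rfl
  | some v =>
    simp only
    have hB : ["long", "short"].filter (fun m => PySem.Set.contains (PySem.Set.ofList v) m)
        = (if "long" ∈ v then ["long"] else []) ++ (if "short" ∈ v then ["short"] else []) := by
      have h1 : PySem.Set.contains (PySem.Set.ofList v) "long" = decide ("long" ∈ v) := by
        simp [PySem.Set.contains, PySem.Set.mem_ofList]
      have h2 : PySem.Set.contains (PySem.Set.ofList v) "short" = decide ("short" ∈ v) := by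
        simp [PySem.Set.contains, PySem.Set.mem_ofList]
      by_cases hl : "long" ∈ v <;> by_cases hs : "short" ∈ v <;>
        simp [List.filter, h1, h2, hl, hs]
    rcases outA_char v with h | h | h | h | h <;> rw [h] <;> rw [hB]
    · -- out = []: neither mode in v, B's filter is empty too
      have hl : "long" ∉ v := fun hv => by
        have := (memA v "long").mpr ⟨Or.inl rfl, hv⟩; rw [h] at this; simp at this
      have hs : "short" ∉ v := fun hv => by
        have := (memA v "short").mpr ⟨Or.inr rfl, hv⟩; rw [h] at this; simp at this
      simp [hl, hs]
    · have hl : "long" ∈ v := ((memA v "long").mp (by rw [h]; simp)).2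
      have hs : "short" ∉ v := fun hv => by
        have := (memA v "short").mpr ⟨Or.inr rfl, hv⟩; rw [h] at this; simp at this
      simp [hl, hs]
      decide
    · have hs : "short" ∈ v := ((memA v "short").mp (by rw [h]; simp)).2
      have hl : "long" ∉ v := fun hv => by
        have := (memA v "long").mpr ⟨Or.inl rfl, hv⟩; rw [h] at this; simp at this
      simp [hl, hs]
      decide
    · have hl : "long" ∈ v := ((memA v "long").mp (by rw [h]; simp)).2
      have hs : "short" ∈ v := ((memA v "short").mp (by rw [h]; simp)).2
      simp [hl, hs]
      decide
    · have hl : "long" ∈ v := ((memA v "long").mp (by rw [h]; simp)).2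
      have hs : "short" ∈ v := ((memA v "short").mp (by rw [h]; simp)).2
      simp [hl, hs]
      decide
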